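-- pv_equiv track=rewrite | github.com/dppalukuri/BlackHole | mcp-servers/google-maps/enrichment.py | _rank_emails
-- ===== SOURCE A (Python) =====
-- def _rank_emails(emails: list[str]) -> list[str]:
--     """Rank emails by likely usefulness for sales outreach.
--
--     Priority: personal names > role-based > generic
--     """
--     personal = []
--     role_based = []
--     generic = []
--
--     role_prefixes = {
--         "info", "contact", "hello", "hi", "support",
--         "help", "sales", "enquiry", "inquiry", "office",
--         "mail", "general", "team", "service",
--     }
--
--     for email in emails:
--         prefix = email.split("@")[0]
--         if prefix in role_prefixes:
--             role_based.append(email)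
--         elif "." in prefix or any(c.isdigit() for c in prefix):
--             # Likely personal (john.doe@, jane2@)
--             personal.append(email)
--         else:
--             generic.append(email)
--
--     # Personal first, then role-based, then generic
--     return (personal + role_based + generic)[:10]
-- ===== SOURCE B (Python) =====
-- def _rank_emails(emails: list[str]) -> list[str]:
--     """Rank emails by likely usefulness for sales outreach.
--
--     Priority: personal names > role-based > generic
--     """
--     role_prefixes = {
--         "info", "contact", "hello", "hi", "support",
--         "help", "sales", "enquiry", "inquiry", "office",
--         "mail", "general", "team", "service",
--     }
--
--     def prio(email: str) -> int:
--         prefix = email.split("@")[0]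
--         if prefix in role_prefixes:
--             return 1
--         if "." in prefix or any(c.isdigit() for c in prefix):
--             return 0
--         return 2
--
--     return sorted(emails, key=prio)[:10]
-- ===== Notes on version B (the rewrite author's own statement) =====
-- stated objective: idiomatic
-- what changed: Replaces the three explicit bucket lists and their concatenation with a single priority key function and one stable sorted(emails, key=prio)[:10], relying on sort stability to keep original order within each priority class.
import Mathlib
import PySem

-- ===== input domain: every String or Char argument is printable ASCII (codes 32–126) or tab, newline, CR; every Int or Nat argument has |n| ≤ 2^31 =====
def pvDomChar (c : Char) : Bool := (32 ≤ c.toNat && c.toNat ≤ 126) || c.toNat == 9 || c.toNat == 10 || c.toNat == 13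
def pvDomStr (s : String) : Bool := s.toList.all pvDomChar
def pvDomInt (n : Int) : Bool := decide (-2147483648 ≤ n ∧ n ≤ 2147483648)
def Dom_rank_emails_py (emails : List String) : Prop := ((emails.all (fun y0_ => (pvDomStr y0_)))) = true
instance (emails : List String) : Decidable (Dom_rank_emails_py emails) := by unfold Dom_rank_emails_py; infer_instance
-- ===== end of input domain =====

-- B replaces A's three explicit bucket lists with one stable sort by a priority key
-- (idiomatic; same return value, order preserved by sort stability).


-- ===== PORT A =====
-- the set literal role_prefixes
def pvRolePrefixesA : PySem.Set String :=
  PySem.Set.ofList ["info", "contact", "hello", "hi", "support",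
    "help", "sales", "enquiry", "inquiry", "office",
    "mail", "general", "team", "service"]

-- email.split("@")[0]: "@" ≠ "" so split? is some, and the split list is never
-- empty, so index [0] never raises; pyGetD with dummy defaults is exact here.
def pvPrefixA (email : String) : String :=
  PySem.List.pyGetD ((PySem.Str.split? email "@").getD []) 0 ""

-- the body of the for-loop: one email is filed into (personal, role_based, generic)
def pvStepA (acc : List String × List String × List String) (email : String) :
    List String × List String × List String :=
  let pfx := pvPrefixA email
  if PySem.Set.contains pvRolePrefixesA pfx then
    (acc.1, acc.2.1 ++ [email], acc.2.2)
  else if PySem.Str.isIn "." pfx || pfx.toList.any PySem.Chars.isdigit then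
    (acc.1 ++ [email], acc.2.1, acc.2.2)
  else
    (acc.1, acc.2.1, acc.2.2 ++ [email])

def rank_emails_py (emails : List String) : List String :=
  -- state = (personal, role_based, generic)
  let s := emails.foldl pvStepA ([], [], [])
  PySem.List.slice (s.1 ++ s.2.1 ++ s.2.2) none (some 10)

-- ===== PORT B =====
def pvRolePrefixesB : PySem.Set String :=
  PySem.Set.ofList ["info", "contact", "hello", "hi", "support",
    "help", "sales", "enquiry", "inquiry", "office",
    "mail", "general", "team", "service"]

-- prio(email); same remark as pvPrefixA: split("@")[0] never raises
def pvPrio (email : String) : Int :=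
  let pfx := PySem.List.pyGetD ((PySem.Str.split? email "@").getD []) 0 ""
  if PySem.Set.contains pvRolePrefixesB pfx then 1
  else if PySem.Str.isIn "." pfx || pfx.toList.any PySem.Chars.isdigit then 0
  else 2

def rank_emails_py_alt (emails : List String) : List String :=
  PySem.List.slice (PySem.List.sorted emails pvPrio) none (some 10)

-- ===== PRECONDITION & SPEC =====
def Spec_rank_emails_py (emails : List String) (out : List String) : Prop := out = rank_emails_py_alt emails
instance (emails : List String) (out : List String) : Decidable (Spec_rank_emails_py emails out) := by unfold Spec_rank_emails_py; infer_instance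

-- ===== CLAIM (what is proved, stated in full; the proofs are below) =====
def Claim_equal_rank_emails_py : Prop := ∀ (emails : List String), Dom_rank_emails_py emails → Spec_rank_emails_py emails (rank_emails_py emails)

-- ===== LEMMAS AND PROOFS =====

-- the two boolean tests, named for the proofs
def pvIsRole (email : String) : Bool := PySem.Set.contains pvRolePrefixesA (pvPrefixA email)
def pvIsPers (email : String) : Bool :=
  PySem.Str.isIn "." (pvPrefixA email) || (pvPrefixA email).toList.any PySem.Chars.isdigit

lemma pvPrio_cases (e : String) :
    pvPrio e = if pvIsRole e then 1 else if pvIsPers e then 0 else 2 := by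
  simp only [pvPrio, pvIsRole, pvIsPers, pvPrefixA, pvRolePrefixesB, pvRolePrefixesA]
  rfl

lemma pvPrio_mem (e : String) : pvPrio e = 0 ∨ pvPrio e = 1 ∨ pvPrio e = 2 := by
  rw [pvPrio_cases]; split_ifs <;> simp

-- each step appends to the bucket selected by the priority
lemma pvStepA_eq (acc : List String × List String × List String) (e : String) :
    pvStepA acc e =
      (if pvPrio e == 0 then acc.1 ++ [e] else acc.1,
       if pvPrio e == 1 then acc.2.1 ++ [e] else acc.2.1,
       if pvPrio e == 2 then acc.2.2 ++ [e] else acc.2.2) := by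
  have hp := pvPrio_cases e
  simp only [pvIsRole, pvIsPers] at hp
  simp only [pvStepA, hp]
  split_ifs <;> simp_all

-- A's loop computes the three filters
lemma pvFoldA (emails p r g : List String) :
    emails.foldl pvStepA (p, r, g)
    = (p ++ emails.filter (fun e => pvPrio e == 0),
       r ++ emails.filter (fun e => pvPrio e == 1),
       g ++ emails.filter (fun e => pvPrio e == 2)) := by
  induction emails generalizing p r g with
  | nil => simp
  | cons e t ih =>
    rw [List.foldl_cons, pvStepA_eq, ih]
    simp only [List.filter_cons]
    split_ifs <;> simp_all

-- inserting past a block that never triggers `before`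
lemma pvInsertBy_append {α : Type} (before : α → α → Bool) (x : α) (l r : List α)
    (h : ∀ y ∈ l, before x y = false) :
    PySem.List.insertBy before x (l ++ r) = l ++ PySem.List.insertBy before x r := by
  induction l with
  | nil => simp
  | cons a t ih =>
    have ha : before x a = false := h a (by simp)
    simp only [List.cons_append, PySem.List.insertBy, ha, Bool.false_eq_true, if_false,
      ih (fun y hy => h y (by simp [hy]))]

-- the stable sort by pvPrio is exactly the three filters concatenated
lemma pvSorted (emails : List String) :
    PySem.List.sorted emails pvPrio
    = emails.filter (fun e => pvPrio e == 0)
      ++ emails.filter (fun e => pvPrio e == 1)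
      ++ emails.filter (fun e => pvPrio e == 2) := by
  rw [PySem.List.sorted_eq_foldl_insertBy]
  induction emails using List.reverseRecOn with
  | nil => simp
  | append_singleton t x ih =>
    rw [List.foldl_append, List.foldl_cons, List.foldl_nil, ih]
    simp only [List.filter_append, List.filter_cons, List.filter_nil]
    rcases pvPrio_mem x with h | h | h
    · rw [List.append_assoc,
        pvInsertBy_append _ _ (t.filter (fun e => pvPrio e == 0))
        (t.filter (fun e => pvPrio e == 1) ++ t.filter (fun e => pvPrio e == 2))
        (by intro y hy; simp only [List.mem_filter, beq_iff_eq] at hy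
            simp [h, hy.2])]
      cases hr : t.filter (fun e => pvPrio e == 1) ++ t.filter (fun e => pvPrio e == 2) with
      | nil =>
        rcases List.append_eq_nil_iff.mp hr with ⟨e1, e2⟩
        simp only [List.filter_eq_nil_iff, beq_iff_eq] at e1 e2
        simp only [PySem.List.insertBy]
        simp [h]
        exact ⟨e1, e2⟩
      | cons y ys =>
        have hy : pvPrio y = 1 ∨ pvPrio y = 2 := by
          have : y ∈ t.filter (fun e => pvPrio e == 1) ++ t.filter (fun e => pvPrio e == 2) := by
            rw [hr]; simp
          rcases List.mem_append.1 this with hm | hm <;>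
            simp only [List.mem_filter, beq_iff_eq] at hm
          · exact Or.inl hm.2
          · exact Or.inr hm.2
        have hb : decide (pvPrio x < pvPrio y) = true := by
          rcases hy with h1 | h1 <;> simp [h, h1]
        simp only [PySem.List.insertBy, hb, if_true]
        simp [h, hr]
    · rw [List.append_assoc,
        pvInsertBy_append _ _ (t.filter (fun e => pvPrio e == 0))
          (t.filter (fun e => pvPrio e == 1) ++ t.filter (fun e => pvPrio e == 2))
          (by intro y hy; simp only [List.mem_filter, beq_iff_eq] at hy
              simp [h, hy.2]),
        pvInsertBy_append _ _ (t.filter (fun e => pvPrio e == 1))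
          (t.filter (fun e => pvPrio e == 2))
          (by intro y hy; simp only [List.mem_filter, beq_iff_eq] at hy
              simp [h, hy.2])]
      cases hr : t.filter (fun e => pvPrio e == 2) with
      | nil =>
        simp only [PySem.List.insertBy]
        simp [h]
      | cons y ys =>
        have hy : pvPrio y = 2 := by
          have : y ∈ t.filter (fun e => pvPrio e == 2) := by rw [hr]; simp
          simpa using (List.mem_filter.1 this).2
        have hb : decide (pvPrio x < pvPrio y) = true := by simp [h, hy]
        simp only [PySem.List.insertBy, hb, if_true]
        simp [h]
    · rw [PySem.List.insertBy_of_forall_not_before _ _ _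
        (by intro y hy
            have : pvPrio y = 0 ∨ pvPrio y = 1 ∨ pvPrio y = 2 := pvPrio_mem y
            rcases this with h1 | h1 | h1 <;> simp [h, h1])]
      simp [h]

-- ===== VERDICT (by name: the statement is the Claim_ definition above) =====
theorem rank_emails_py_spec : Claim_equal_rank_emails_py := by
  intro emails _
  unfold Spec_rank_emails_py rank_emails_py rank_emails_py_alt
  rw [pvSorted, pvFoldA]
  simp
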